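-- pv_equiv track=rewrite | github.com/Homiez09/cs112-65-1 | Lab14.2/02.py | cloth_size
-- ===== SOURCE A (Python) =====
-- def cloth_size(width_list):
--     size = {'S': 0, 'M': 0, 'L': 0}
--     for i in width_list:
--         if i > 44:
--             size["L"] += 1
--         elif i > 36:
--             size["M"] += 1
--         else:
--             size["S"] += 1
--     return size
-- ===== SOURCE B (Python) =====
-- def cloth_size(width_list):
--     L = sum(1 for i in width_list if i > 44)
--     M = sum(1 for i in width_list if 36 < i <= 44)
--     S = sum(1 for i in width_list if i <= 36)
--     return {'S': S, 'M': M, 'L': L}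
-- ===== Notes on version B (the rewrite author's own statement) =====
-- stated objective: simpler
-- what changed: Replaces the single branching pass that mutates a dict with three independent full-scan counts (one per size class) assembled into the result dict at the end.
import Mathlib
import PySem

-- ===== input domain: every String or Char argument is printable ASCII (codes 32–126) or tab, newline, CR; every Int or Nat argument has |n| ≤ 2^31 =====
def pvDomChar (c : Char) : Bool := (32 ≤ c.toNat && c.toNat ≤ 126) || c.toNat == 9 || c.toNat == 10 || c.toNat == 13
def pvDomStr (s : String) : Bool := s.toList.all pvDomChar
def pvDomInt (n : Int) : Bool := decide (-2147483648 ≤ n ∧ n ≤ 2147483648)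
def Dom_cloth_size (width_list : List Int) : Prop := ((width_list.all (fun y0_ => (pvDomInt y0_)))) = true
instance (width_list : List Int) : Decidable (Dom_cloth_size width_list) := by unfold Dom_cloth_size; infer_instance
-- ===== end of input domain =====

-- B computes the three counts by three independent full scans instead of one branching pass (objective: simpler).
-- ===== PORT A =====
def cloth_size (width_list : List Int) : List (String × Int) :=
  -- size = {'S': 0, 'M': 0, 'L': 0}
  let size : PySem.Dict String Int :=
    ((PySem.Dict.empty.insert "S" 0).insert "M" 0).insert "L" 0
  -- for i in width_list: if i > 44: size["L"] += 1 elif i > 36: size["M"] += 1 else: size["S"] += 1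
  let size := width_list.foldl (fun d i =>
    if i > 44 then d.modify "L" 0 (· + 1)
    else if i > 36 then d.modify "M" 0 (· + 1)
    else d.modify "S" 0 (· + 1)) size
  size.items

-- ===== PORT B =====
def cloth_size_alt (width_list : List Int) : List (String × Int) :=
  let L : Int := ((width_list.filter (fun i => i > 44)).map (fun _ => (1:Int))).sum
  let M : Int := ((width_list.filter (fun i => 36 < i ∧ i ≤ 44)).map (fun _ => (1:Int))).sum
  let S : Int := ((width_list.filter (fun i => i ≤ 36)).map (fun _ => (1:Int))).sum
  [("S", S), ("M", M), ("L", L)]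

-- ===== PRECONDITION & SPEC =====
def Spec_cloth_size (width_list : List Int) (out : List (String × Int)) : Prop := out = cloth_size_alt width_list
instance (width_list : List Int) (out : List (String × Int)) : Decidable (Spec_cloth_size width_list out) := by unfold Spec_cloth_size; infer_instance

-- ===== CLAIM (what is proved, stated in full; the proofs are below) =====
def Claim_equal_cloth_size : Prop := ∀ (width_list : List Int), Dom_cloth_size width_list → Spec_cloth_size width_list (cloth_size width_list)

-- ===== LEMMAS AND PROOFS =====

-- ===== VERDICT (by name: the statement is the Claim_ definition above) =====
-- loop invariant: the fold keeps the dict in shape [("S",s),("M",m),("L",l)] and adds the three counts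
theorem cloth_size_loop (ws : List Int) (s m l : Int) :
    ws.foldl (fun d i =>
      if i > 44 then d.modify "L" 0 (· + 1)
      else if i > 36 then d.modify "M" 0 (· + 1)
      else d.modify "S" 0 (· + 1)) (PySem.Dict.mk [("S", s), ("M", m), ("L", l)]) =
    PySem.Dict.mk [("S", s + (ws.countP (fun i => decide (i ≤ 36)) : Int)),
                   ("M", m + (ws.countP (fun i => decide (36 < i ∧ i ≤ 44)) : Int)),
                   ("L", l + (ws.countP (fun i => decide (i > 44)) : Int))] := by
  induction ws generalizing s m l with
  | nil => simp
  | cons x xs ih =>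
    by_cases h1 : x > 44
    · simp only [List.foldl_cons, if_pos h1, List.countP_cons]
      rw [show (PySem.Dict.mk [("S", s), ("M", m), ("L", l)]).modify "L" 0 (· + 1)
            = PySem.Dict.mk [("S", s), ("M", m), ("L", l + 1)] by rfl, ih]
      have : ¬ (x ≤ 36) := by omega
      have : ¬ (36 < x ∧ x ≤ 44) := by omega
      simp_all
      omega
    · by_cases h2 : x > 36
      · simp only [List.foldl_cons, if_neg h1, if_pos h2, List.countP_cons]
        rw [show (PySem.Dict.mk [("S", s), ("M", m), ("L", l)]).modify "M" 0 (· + 1)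
              = PySem.Dict.mk [("S", s), ("M", m + 1), ("L", l)] by rfl, ih]
        have : ¬ (x ≤ 36) := by omega
        have : 36 < x ∧ x ≤ 44 := by omega
        simp_all
        omega
      · simp only [List.foldl_cons, if_neg h1, if_neg h2, List.countP_cons]
        rw [show (PySem.Dict.mk [("S", s), ("M", m), ("L", l)]).modify "S" 0 (· + 1)
              = PySem.Dict.mk [("S", s + 1), ("M", m), ("L", l)] by rfl, ih]
        have : x ≤ 36 := by omega
        have : ¬ (36 < x ∧ x ≤ 44) := by omega
        have : ¬ (x > 44) := by omega
        simp_all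
        omega

theorem cloth_size_spec : Claim_equal_cloth_size := by
  intro ws _
  unfold Spec_cloth_size cloth_size cloth_size_alt
  simp only [show ((PySem.Dict.empty.insert "S" (0:Int)).insert "M" 0).insert "L" 0
        = PySem.Dict.mk [("S", 0), ("M", 0), ("L", 0)] from rfl, cloth_size_loop]
  simp [List.countP_eq_length_filter]
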